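-- pv_equiv track=rewrite | github.com/AhmedHessain/Text-Image-Encryption-GUI | cyperSecurity.py | polyalphabetic_encrypt
-- ===== SOURCE A (Python) =====
-- def polyalphabetic_encrypt(text, key):
--     text = text.lower()
--     result = ''
--     for char in text:
--         if char.isalpha():
--             encrypted_char = chr((ord(char) - 97 + key) % 26 + 97)
--             key = ord(char) - 97
--             result += encrypted_char
--         else:
--             result += char
--     return result
-- ===== SOURCE B (Python) =====
-- def polyalphabetic_encrypt(text, key):
--     s = text.lower()
--     letters = [ord(c) - 97 for c in s if c.isalpha()]
--     keystream = [key] + letters[:-1]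
--     enc = iter(chr((v + k) % 26 + 97) for v, k in zip(letters, keystream))
--     return ''.join(next(enc) if c.isalpha() else c for c in s)
-- ===== Notes on version B (the rewrite author's own statement) =====
-- stated objective: alternative
-- what changed: Replaces A's stateful loop (key mutated each alphabetic step) with a precomputed keystream [key]+letters[:-1], a zip producing all encrypted letters at once, and a separate merge pass over the text.
import Mathlib
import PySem

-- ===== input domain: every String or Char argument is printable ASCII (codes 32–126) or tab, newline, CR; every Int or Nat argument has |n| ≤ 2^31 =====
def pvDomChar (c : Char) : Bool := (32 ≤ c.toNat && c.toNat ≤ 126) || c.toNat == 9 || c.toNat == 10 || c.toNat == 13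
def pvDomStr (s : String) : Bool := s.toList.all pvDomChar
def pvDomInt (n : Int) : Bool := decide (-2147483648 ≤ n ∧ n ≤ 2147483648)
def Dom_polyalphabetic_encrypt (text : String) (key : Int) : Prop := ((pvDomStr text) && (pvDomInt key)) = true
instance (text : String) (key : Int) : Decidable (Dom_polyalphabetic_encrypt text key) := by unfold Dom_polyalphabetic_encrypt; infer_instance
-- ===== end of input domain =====

-- B replaces A's stateful loop by a precomputed keystream ([key] + letters[:-1]) zipped with the
-- letter values, then a single merge pass; objective: alternative decomposition (same cost class).

-- ===== PORT A =====
-- A: lower the text, then one pass with mutable state (result, key): each alphabetic char is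
-- shifted by the current key and the key becomes that char's value; others are copied.
def polyalphabetic_encrypt (text : String) (key : Int) : String :=
  let s := (PySem.Str.lower text).toList
  let st := s.foldl (fun (acc : List Char × Int) c =>
    if PySem.Chars.isalpha c then
      (acc.1 ++ [Char.ofNat ((PySem.Int.mod (((c.toNat : Int) - 97) + acc.2) 26) + 97).toNat],
        (c.toNat : Int) - 97)
    else (acc.1 ++ [c], acc.2)) ([], key)
  String.ofList st.1

-- ===== PORT B =====
def pvLetters (s : List Char) : List Int :=
  s.filterMap (fun c => if PySem.Chars.isalpha c then some ((c.toNat : Int) - 97) else none)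

def pvEncChar (v k : Int) : Char := Char.ofNat ((PySem.Int.mod (v + k) 26) + 97).toNat

-- the ''.join merge pass: pull the next encrypted letter for each alphabetic char
def pvMerge : List Char → List Char → List Char
  | [], _ => []
  | c :: cs, es =>
    if PySem.Chars.isalpha c then
      match es with
      | e :: es' => e :: pvMerge cs es'
      | [] => pvMerge cs []          -- unreachable: enc has one value per alphabetic char
    else c :: pvMerge cs es

def polyalphabetic_encrypt_alt (text : String) (key : Int) : String :=
  let s := (PySem.Str.lower text).toList
  let letters := pvLetters s
  let keystream := key :: letters.dropLast
  let enc := (letters.zip keystream).map (fun p => pvEncChar p.1 p.2)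
  String.ofList (pvMerge s enc)

-- ===== PRECONDITION & SPEC =====
def Spec_polyalphabetic_encrypt (text : String) (key : Int) (out : String) : Prop := out = polyalphabetic_encrypt_alt text key
instance (text : String) (key : Int) (out : String) : Decidable (Spec_polyalphabetic_encrypt text key out) := by unfold Spec_polyalphabetic_encrypt; infer_instance

-- ===== CLAIM (what is proved, stated in full; the proofs are below) =====
def Claim_equal_polyalphabetic_encrypt : Prop := ∀ (text : String) (key : Int), Dom_polyalphabetic_encrypt text key → Spec_polyalphabetic_encrypt text key (polyalphabetic_encrypt text key)

-- ===== LEMMAS AND PROOFS =====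

-- reference recursion: what A's loop produces, with the key threaded explicitly
def pvCore : List Char → Int → List Char
  | [], _ => []
  | c :: cs, k =>
    if PySem.Chars.isalpha c then
      pvEncChar ((c.toNat : Int) - 97) k :: pvCore cs ((c.toNat : Int) - 97)
    else c :: pvCore cs k

theorem pvFoldl_eq_core (cs : List Char) : ∀ (res : List Char) (k : Int),
    (cs.foldl (fun (acc : List Char × Int) c =>
      if PySem.Chars.isalpha c then
        (acc.1 ++ [Char.ofNat ((PySem.Int.mod (((c.toNat : Int) - 97) + acc.2) 26) + 97).toNat],
          (c.toNat : Int) - 97)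
      else (acc.1 ++ [c], acc.2)) (res, k)).1 = res ++ pvCore cs k := by
  induction cs with
  | nil => intro res k; simp [pvCore]
  | cons c cs ih =>
    intro res k
    rw [List.foldl_cons]
    dsimp only
    by_cases h : PySem.Chars.isalpha c = true
    · rw [if_pos h, ih]; simp [pvCore, h, pvEncChar]
    · rw [if_neg h, ih]; simp [pvCore, h]

theorem pvLetters_cons (c : Char) (cs : List Char) :
    pvLetters (c :: cs) =
      if PySem.Chars.isalpha c then ((c.toNat : Int) - 97) :: pvLetters cs else pvLetters cs := by
  by_cases h : PySem.Chars.isalpha c = true <;> simp [pvLetters, h]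

theorem pvZip_dropLast (v : Int) (L : List Int) :
    L.zip ((v :: L).dropLast) = L.zip (v :: L.dropLast) := by
  cases L with
  | nil => rfl
  | cons a t => simp [List.dropLast]

theorem pvMerge_enc (cs : List Char) : ∀ (k : Int),
    pvMerge cs (((pvLetters cs).zip (k :: (pvLetters cs).dropLast)).map
      (fun p => pvEncChar p.1 p.2)) = pvCore cs k := by
  induction cs with
  | nil => intro k; simp [pvMerge, pvCore]
  | cons c cs ih =>
    intro k
    by_cases h : PySem.Chars.isalpha c = true
    · rw [pvLetters_cons, if_pos h, List.zip_cons_cons, pvZip_dropLast, List.map_cons]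
      simp only [pvMerge, h, if_pos]
      rw [ih]
      simp [pvCore, h]
    · rw [pvLetters_cons, if_neg h]
      simp only [pvMerge, h]
      rw [ih]
      simp [pvCore, h]

-- ===== VERDICT (by name: the statement is the Claim_ definition above) =====
theorem polyalphabetic_encrypt_spec : Claim_equal_polyalphabetic_encrypt := by
  intro text key _
  unfold Spec_polyalphabetic_encrypt polyalphabetic_encrypt polyalphabetic_encrypt_alt
  dsimp only
  rw [pvFoldl_eq_core, pvMerge_enc]
  simp
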